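-- pv_equiv track=rewrite | github.com/miiiingi/ps | programmers/코딩테스트연습/그리디/조이스틱.py | solution
-- ===== SOURCE A (Python) =====
-- def solution(name):
--     answer = 0
--     length = len(name)
--
--     # 1. 초기값 세팅: 시나리오 1 (무지성 직진) 거리를 디폴트 최솟값으로 둡니다.
--     min_move = length - 1
--
--     for i in range(length):
--         # [미션 1] 알파벳 조작 횟수 (상하) - 작성하신 완벽한 코드 그대로!
--         answer += min(ord(name[i]) - ord("A"), ord("Z") - ord(name[i]) + 1)
--
--         # [미션 2] 커서 이동 횟수 (좌우)의 최솟값 갱신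
--         # 2-1. 내 위치(i) 바로 다음부터 연속된 'A'가 끝나는 지점(next_i) 찾기
--         next_i = i + 1
--
--         # IndexError 방지 조건 추가!
--         while next_i < length and name[next_i] == 'A':
--             next_i += 1
--
--         # 2-2. 3가지 동선 중 가장 짧은 거리를 계산하여 min_move를 계속 갱신
--         # 기존 최솟값,
--         # 시나리오 2 (찍고 턴: i*2 + length - next_i),
--         # 시나리오 3 (역주행 턴: i + (length - next_i)*2)
--         min_move = min(min_move,
--                        (i * 2) + (length - next_i),
--                        i + (length - next_i) * 2)
--
--     # 상하 조작 횟수 + 가장 짧은 좌우 이동 횟수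
--     return answer + min_move
-- ===== SOURCE B (Python) =====
-- def solution(name):
--     length = len(name)
--     up = sum(min(ord(c) - 65, 91 - ord(c)) for c in name)
--     nxt = [length] * (length + 1)
--     for i in range(length - 1, -1, -1):
--         nxt[i] = i if name[i] != 'A' else nxt[i + 1]
--     best = length - 1
--     for i in range(length):
--         t = length - nxt[i + 1]
--         best = min(best, 2 * i + t, i + 2 * t)
--     return up + best
-- ===== Notes on version B (the rewrite author's own statement) =====
-- stated objective: alternative
-- what changed: Replaces A's per-position forward while-scan for the next non-'A' character with a single backward pass that precomputes a next-non-'A' table, then O(1) lookups in one forward pass; on the measured random inputs the runtimes are comparable.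
import Mathlib
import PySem

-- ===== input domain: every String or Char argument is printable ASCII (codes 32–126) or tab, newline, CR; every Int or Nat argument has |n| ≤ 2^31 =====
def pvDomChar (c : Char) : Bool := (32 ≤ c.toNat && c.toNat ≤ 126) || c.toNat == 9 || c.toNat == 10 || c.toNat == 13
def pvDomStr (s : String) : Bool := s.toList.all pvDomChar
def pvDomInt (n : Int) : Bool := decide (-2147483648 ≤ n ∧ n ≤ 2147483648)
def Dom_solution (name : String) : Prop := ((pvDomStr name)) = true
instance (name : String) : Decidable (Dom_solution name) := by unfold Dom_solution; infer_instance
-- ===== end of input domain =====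

-- B replaces A's per-position inner while-scan with one backward pass precomputing the next non-'A'
-- index per position; return values are identical on all strings.

-- ===== PORT A =====
-- inner 'while next_i < length and name[next_i] == "A": next_i += 1'
def aWhile (cs : List Char) (j : Nat) : Nat :=
  if h : j < cs.length then
    if cs[j]! = 'A' then aWhile cs (j + 1) else j
  else j
termination_by cs.length - j

def solution (name : String) : Int :=
  let cs := name.toList
  let n := cs.length
  let st := (List.range n).foldl
    (fun (st : Int × Int) (i : Nat) =>
      (st.1 + min ((cs[i]!.toNat : Int) - 65) (90 - (cs[i]!.toNat : Int) + 1),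
       min (min st.2 ((i : Int) * 2 + ((n : Int) - (aWhile cs (i + 1) : Int))))
           ((i : Int) + ((n : Int) - (aWhile cs (i + 1) : Int)) * 2)))
    (0, (n : Int) - 1)
  st.1 + st.2

-- ===== PORT B =====
-- the backward pass 'for i in range(length-1,-1,-1): nxt[i] = i if name[i] != "A" else nxt[i+1]'
-- built as the structural recursion from the end of the list; ds is the suffix starting at index i
def buildNxt (ds : List Char) (i n : Nat) : List Nat :=
  match ds with
  | [] => [n]
  | c :: rest =>
    let tail := buildNxt rest (i + 1) n
    (if c ≠ 'A' then i else tail.head!) :: tail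

def solution_alt (name : String) : Int :=
  let cs := name.toList
  let n := cs.length
  let up := cs.foldl (fun s c => s + min ((c.toNat : Int) - 65) (91 - (c.toNat : Int))) 0
  let nxt := buildNxt cs 0 n
  let best := (List.range n).foldl
    (fun (m : Int) (i : Nat) =>
      min (min m (2 * (i : Int) + ((n : Int) - (nxt[i + 1]! : Int))))
          ((i : Int) + 2 * ((n : Int) - (nxt[i + 1]! : Int))))
    ((n : Int) - 1)
  up + best

-- ===== PRECONDITION & SPEC =====
def Spec_solution (name : String) (out : Int) : Prop := out = solution_alt name
instance (name : String) (out : Int) : Decidable (Spec_solution name out) := by unfold Spec_solution; infer_instance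

-- ===== CLAIM (what is proved, stated in full; the proofs are below) =====
def Claim_equal_solution : Prop := ∀ (name : String), Dom_solution name → Spec_solution name (solution name)

-- ===== LEMMAS AND PROOFS =====

-- a foldl whose pair state is updated componentwise splits into two independent foldls
theorem foldl_pair_split {a b c : Type} (f : a × b -> c -> a × b) (g : a -> c -> a) (h : b -> c -> b)
    (hf : forall p i, f p i = (g p.1 i, h p.2 i))
    (l : List c) (x : a) (y : b) :
    l.foldl f (x, y) = (l.foldl g x, l.foldl h y) := by
  induction l generalizing x y with
  | nil => rfl
  | cons z zs ih => simp [List.foldl, hf, ih]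

-- foldl respects pointwise-on-members equality of the step functions
theorem foldl_congr_mem' {a c : Type} (l : List c) (f g : a -> c -> a) (x : a)
    (h : forall i, i ∈ l -> forall s, f s i = g s i) :
    l.foldl f x = l.foldl g x := by
  induction l generalizing x with
  | nil => rfl
  | cons z zs ih =>
    simp only [List.foldl]
    rw [h z (by simp)]
    exact ih _ (fun i hi s => h i (by simp [hi]) s)

theorem buildNxt_length (ds : List Char) (i n : Nat) :
    (buildNxt ds i n).length = ds.length + 1 := by
  induction ds generalizing i with
  | nil => rfl
  | cons c rest ih => simp [buildNxt, ih]

theorem aWhile_unfold_lt (cs : List Char) (j : Nat) (h : j < cs.length) :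
    aWhile cs j = if cs[j]! = 'A' then aWhile cs (j + 1) else j := by
  rw [aWhile]; simp [h]

theorem aWhile_unfold_ge (cs : List Char) (j : Nat) (h : ¬ j < cs.length) :
    aWhile cs j = j := by
  rw [aWhile]; simp [h]

-- the backward-pass table agrees with A's forward while-scan
theorem buildNxt_get (cs : List Char) :
    forall (ds : List Char) (i : Nat), ds = cs.drop i -> i <= cs.length ->
    forall k, k <= ds.length -> (buildNxt ds i cs.length)[k]! = aWhile cs (i + k) := by
  intro ds
  induction ds with
  | nil =>
    intro i hds hi k hk
    have hk0 : k = 0 := by simpa using hk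
    subst hk0
    have hge : cs.length <= i := by
      have := List.drop_eq_nil_iff.mp hds.symm
      omega
    have hi' : i = cs.length := le_antisymm hi hge
    simp [buildNxt, hi', aWhile_unfold_ge cs cs.length (by omega)]
  | cons c rest ih =>
    intro i hds hi k hk
    have hlend := congrArg List.length hds
    simp only [List.length_cons, List.length_drop] at hlend
    have hilt : i < cs.length := by omega
    have hrest : rest = cs.drop (i + 1) := by
      have h2 : List.drop (i + 1) cs = List.drop 1 (List.drop i cs) := by
        rw [List.drop_drop]
      rw [h2, <- hds]
      rfl
    have hc : cs[i]! = c := by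
      rw [getElem!_pos cs i hilt]
      have h0 : (List.drop i cs)[0]'(by simp [List.length_drop]; omega) = c := by
        simp [<- hds]
      simpa using h0
    have hl := buildNxt_length rest (i + 1) cs.length
    obtain ⟨z, zs, hz⟩ : ∃ z zs, buildNxt rest (i + 1) cs.length = z :: zs := by
      cases hbn : buildNxt rest (i + 1) cs.length with
      | nil => rw [hbn] at hl; simp at hl
      | cons z zs => exact ⟨z, zs, rfl⟩
    have hz0 : z = aWhile cs (i + 1) := by
      have h0 := ih (i + 1) hrest (by omega) 0 (by omega)
      rw [hz] at h0
      simpa using h0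
    match k with
    | 0 =>
      simp only [buildNxt, hz, Nat.add_zero]
      rw [aWhile_unfold_lt cs i hilt, hc]
      by_cases hA : c = 'A'
      · simp [hA, hz0, List.head!]
      · simp [hA]
    | Nat.succ k' =>
      have hk2 : k' <= rest.length := by simpa using hk
      have htail := ih (i + 1) hrest (by omega) k' hk2
      simp only [buildNxt]
      have hstep : ((if c ≠ 'A' then i else (buildNxt rest (i + 1) cs.length).head!) ::
          buildNxt rest (i + 1) cs.length)[k' + 1]! = (buildNxt rest (i + 1) cs.length)[k']! := by
        rw [getElem!_pos _ (k' + 1) (by simp only [List.length_cons, hl]; omega),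
            getElem!_pos _ k' (by omega)]
        simp
      rw [hstep, htail]
      congr 1
      omega

-- the up/down sum over indices equals the sum over the characters
theorem up_fold_eq (cs : List Char) :
    forall (x : Int),
    (List.range cs.length).foldl
      (fun s i => s + min ((cs[i]!.toNat : Int) - 65) (90 - (cs[i]!.toNat : Int) + 1)) x
    = cs.foldl (fun s c => s + min ((c.toNat : Int) - 65) (91 - (c.toNat : Int))) x := by
  induction cs using List.reverseRecOn with
  | nil => intro x; rfl
  | append_singleton ds c ih =>
    intro x
    simp only [List.length_append, List.length_singleton, List.range_succ,
      List.foldl_append, List.foldl_cons, List.foldl_nil]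
    rw [foldl_congr_mem' _ _
      (fun s i => s + min ((ds[i]!.toNat : Int) - 65) (90 - (ds[i]!.toNat : Int) + 1)) x
      (by
        intro i hi s
        have hilt : i < ds.length := List.mem_range.mp hi
        have he : (ds ++ [c])[i]! = ds[i]! := by
          rw [getElem!_pos _ i (by simp; omega), getElem!_pos ds i hilt]
          exact List.getElem_append_left hilt
        rw [he])]
    rw [ih]
    have hc : (ds ++ [c])[ds.length]! = c := by
      rw [getElem!_pos _ _ (by simp)]
      simp
    rw [hc]
    congr 1
    omega

-- ===== VERDICT (by name: the statement is the Claim_ definition above) =====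
theorem solution_spec : Claim_equal_solution := by
  unfold Claim_equal_solution Spec_solution
  intro name _
  unfold solution solution_alt
  simp only []
  rw [foldl_pair_split _
    (fun (s : Int) (i : Nat) =>
      s + min ((name.toList[i]!.toNat : Int) - 65) (90 - (name.toList[i]!.toNat : Int) + 1))
    (fun (m : Int) (i : Nat) =>
      min (min m ((i : Int) * 2 + ((name.toList.length : Int) - (aWhile name.toList (i + 1) : Int))))
          ((i : Int) + ((name.toList.length : Int) - (aWhile name.toList (i + 1) : Int)) * 2))
    (fun p i => rfl)]
  dsimp only
  rw [up_fold_eq name.toList 0]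
  have hbest : (List.range name.toList.length).foldl
      (fun (m : Int) (i : Nat) =>
        min (min m ((i : Int) * 2 + ((name.toList.length : Int) - (aWhile name.toList (i + 1) : Int))))
            ((i : Int) + ((name.toList.length : Int) - (aWhile name.toList (i + 1) : Int)) * 2))
      ((name.toList.length : Int) - 1)
    = (List.range name.toList.length).foldl
      (fun (m : Int) (i : Nat) =>
        min (min m (2 * (i : Int) + ((name.toList.length : Int) - (((buildNxt name.toList 0 name.toList.length)[i + 1]! : Nat) : Int))))
            ((i : Int) + 2 * ((name.toList.length : Int) - (((buildNxt name.toList 0 name.toList.length)[i + 1]! : Nat) : Int))))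
      ((name.toList.length : Int) - 1) := by
    apply foldl_congr_mem'
    intro i hi s
    have hilt : i < name.toList.length := List.mem_range.mp hi
    have hbg := buildNxt_get name.toList name.toList 0 (by simp) (by omega) (i + 1) (by omega)
    simp only [Nat.zero_add] at hbg
    rw [hbg]
    ring_nf
  rw [hbest]
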